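-- pv_equiv track=rewrite | github.com/Ziyangpig/Inventory_replenishment_management- | lookahead_heur.py | calculate_C_h_s_coefficients
-- ===== SOURCE A (Python) =====
-- def calculate_C_h_s_coefficients(w, r, h, s):
--     y_coefficients = []
--     #TODO: 每个n内部的list的尾部，这里可能需要补全0，使得到T-r，
--     dn_coefficients = {n: [] for n in range(0, w + 1)}  # 初始化每个 dq 的系数
--
--     # 对于每个 n 从 1 到 w，计算 C_h/s 关于 y 和 dq 的系数
--     for n in range(0, w + 1):
--         # 初始化 y 和 dq 的系数
--         y_coeff = 0
--         dq_coeff = {q: 0 for q in range(r, r + w )}  # 每个 dq 的系数初始化为 0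
--
--         # 第一项: f_n * h * (y - sum(dq))，计算关于 y 和 dq 的系数
--         for t in range(r, r + n):
--             y_coeff += h  # y 的系数为 h
--             for q in range(r, t + 1):
--                 dq_coeff[q] -= h  # d_q 的系数为 -h
--
--         # 第二项: -s * (y - sum(dq))，计算关于 y 和 dq 的系数
--         for t in range(r + n, r + w ):
--             y_coeff -= s  # y 的系数为 -s
--             for q in range(r, t + 1):
--                 dq_coeff[q] += s  # d_q 的系数为 s
--
--         # 存储每个 n 对应的 y 和 dq 的系数
--         y_coefficients.append(y_coeff)
--
--         dn_coefficients[n] = dq_coeff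
--
--     return y_coefficients, dn_coefficients
-- ===== SOURCE B (Python) =====
-- def calculate_C_h_s_coefficients(w, r, h, s):
--     # Closed-form coefficients instead of nested accumulation loops:
--     # y-coeff for n is n*h - (w-n)*s; the coefficient of d_{r+j} is
--     # s*(w-n) - h*(n-j) for j < n and s*(w-j) for j >= n.
--     keys = [r + j for j in range(w)]
--     y_coefficients = [n * h - (w - n) * s for n in range(0, w + 1)]
--     dn_coefficients = {}
--     for n in range(0, w + 1):
--         head = [s * (w - n) - h * (n - j) for j in range(n)]
--         tail = [s * (w - j) for j in range(n, w)]
--         dn_coefficients[n] = dict(zip(keys, head + tail))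
--     return y_coefficients, dn_coefficients
-- ===== Notes on version B (the rewrite author's own statement) =====
-- stated objective: faster
-- what changed: Replaced A's three nested accumulation loops (for each n, iterate over t and over q <= t, decrementing/incrementing each dict cell) by closed-form multiplicity formulas built with range-split comprehensions: y-coeff = n*h - (w-n)*s, and the coefficient of d_{r+j} is s*(w-n) - h*(n-j) for j < n and s*(w-j) for j >= n.
import Mathlib
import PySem

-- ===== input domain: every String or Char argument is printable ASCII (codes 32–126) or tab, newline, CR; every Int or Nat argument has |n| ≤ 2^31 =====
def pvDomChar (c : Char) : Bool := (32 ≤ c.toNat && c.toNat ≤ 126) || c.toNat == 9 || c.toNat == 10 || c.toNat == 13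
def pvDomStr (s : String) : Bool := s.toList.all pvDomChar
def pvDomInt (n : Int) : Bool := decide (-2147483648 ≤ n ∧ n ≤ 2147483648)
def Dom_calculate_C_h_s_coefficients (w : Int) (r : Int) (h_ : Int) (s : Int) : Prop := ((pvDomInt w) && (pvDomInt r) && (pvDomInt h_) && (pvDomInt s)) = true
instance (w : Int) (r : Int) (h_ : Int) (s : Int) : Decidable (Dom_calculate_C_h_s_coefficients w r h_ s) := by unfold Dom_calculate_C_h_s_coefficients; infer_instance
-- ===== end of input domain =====

-- B replaces A's nested per-cell accumulation loops by closed-form multiplicity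
-- formulas for every coefficient (objective: faster, O(w^2) instead of O(w^3)).

-- ===== PORT A =====
-- Loop body of A's outer `for n` loop: returns (y_coeff, dq_coeff).
-- `dq_coeff[q] -= h` / `dq_coeff[q] += s` always hit an existing key
-- (r ≤ q ≤ t < r+w), so Dict.modify is exact here.
def pvA_body (w : Int) (r : Int) (h_ : Int) (s : Int) (n : Int) : Int × PySem.Dict Int Int :=
  let dq0 : PySem.Dict Int Int :=
    (PySem.List.pyRange r (r + w) 1).foldl (fun d q => d.insert q 0) PySem.Dict.empty
  let p1 := (PySem.List.pyRange r (r + n) 1).foldl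
    (fun (p : Int × PySem.Dict Int Int) t =>
      (p.1 + h_, (PySem.List.pyRange r (t + 1) 1).foldl (fun d q => d.modify q 0 (fun v => v - h_)) p.2))
    (0, dq0)
  (PySem.List.pyRange (r + n) (r + w) 1).foldl
    (fun (p : Int × PySem.Dict Int Int) t =>
      (p.1 - s, (PySem.List.pyRange r (t + 1) 1).foldl (fun d q => d.modify q 0 (fun v => v + s)) p.2))
    p1


def calculate_C_h_s_coefficients (w : Int) (r : Int) (h_ : Int) (s : Int) : List Int × (List (Int × List (Int × Int))) :=
  let dn0 : PySem.Dict Int (List (Int × Int)) :=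
    (PySem.List.pyRange 0 (w + 1) 1).foldl (fun d n => d.insert n []) PySem.Dict.empty
  let res := (PySem.List.pyRange 0 (w + 1) 1).foldl
    (fun (acc : List Int × PySem.Dict Int (List (Int × Int))) n =>
      let p := pvA_body w r h_ s n
      (acc.1 ++ [p.1], acc.2.insert n p.2.items))
    ([], dn0)
  (res.1, res.2.items)

-- ===== PORT B =====
def calculate_C_h_s_coefficients_alt (w : Int) (r : Int) (h_ : Int) (s : Int) : List Int × (List (Int × List (Int × Int))) :=
  let keys := (PySem.List.pyRange 0 w 1).map (fun j => r + j)
  ((PySem.List.pyRange 0 (w + 1) 1).map (fun n => n * h_ - (w - n) * s),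
   (PySem.List.pyRange 0 (w + 1) 1).map (fun n =>
     (n, keys.zip ((PySem.List.pyRange 0 n 1).map (fun j => s * (w - n) - h_ * (n - j))
                   ++ (PySem.List.pyRange n w 1).map (fun j => s * (w - j))))))

-- ===== PRECONDITION & SPEC =====
def Spec_calculate_C_h_s_coefficients (w : Int) (r : Int) (h_ : Int) (s : Int) (out : List Int × (List (Int × List (Int × Int)))) : Prop := out = calculate_C_h_s_coefficients_alt w r h_ s
instance (w : Int) (r : Int) (h_ : Int) (s : Int) (out : List Int × (List (Int × List (Int × Int)))) : Decidable (Spec_calculate_C_h_s_coefficients w r h_ s out) := by unfold Spec_calculate_C_h_s_coefficients; infer_instance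

-- ===== CLAIM (what is proved, stated in full; the proofs are below) =====
def Claim_equal_calculate_C_h_s_coefficients : Prop := ∀ (w : Int) (r : Int) (h_ : Int) (s : Int), Dom_calculate_C_h_s_coefficients w r h_ s → Spec_calculate_C_h_s_coefficients w r h_ s (calculate_C_h_s_coefficients w r h_ s)

-- ===== LEMMAS AND PROOFS =====

theorem pv_graph_getD {ν : Type} (L : List Int) (g : Int → ν) (k : Int) (d0 : ν)
    (hk : k ∈ L) :
    (PySem.Dict.mk (L.map fun q => (q, g q))).getD k d0 = g k := by
  induction L with
  | nil => simp at hk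
  | cons a L ih =>
    rw [PySem.Dict.getD_eq_get?_getD]
    simp only [List.map_cons, PySem.Dict.get?_mk_cons]
    by_cases h : a = k
    · simp [h]
    · simp only [beq_iff_eq, h, if_false]
      rw [← PySem.Dict.getD_eq_get?_getD]
      exact ih ((List.mem_cons.1 hk).resolve_left (fun h' => h h'.symm))

theorem pv_graph_contains {ν : Type} (L : List Int) (g : Int → ν) (k : Int)
    (hk : k ∈ L) :
    (PySem.Dict.mk (L.map fun q => (q, g q))).contains k = true := by
  rw [PySem.Dict.contains_iff_mem_keys]
  simp only [PySem.Dict.keys, List.map_map]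
  simpa using hk

theorem pv_graph_insert {ν : Type} (L : List Int) (g : Int → ν) (k : Int) (v : ν)
    (hk : k ∈ L) :
    (PySem.Dict.mk (L.map fun q => (q, g q))).insert k v
      = PySem.Dict.mk (L.map fun q => (q, if q = k then v else g q)) := by
  rw [PySem.Dict.insert, if_pos (pv_graph_contains L g k hk)]
  congr 1
  simp only [List.map_map]
  apply List.map_congr_left
  intro q _
  by_cases h : q = k <;> simp [h]

theorem pv_graph_modify {ν : Type} (L : List Int) (g : Int → ν) (k : Int) (d0 : ν) (F : ν → ν)
    (hk : k ∈ L) :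
    (PySem.Dict.mk (L.map fun q => (q, g q))).modify k d0 F
      = PySem.Dict.mk (L.map fun q => (q, if q = k then F (g q) else g q)) := by
  rw [PySem.Dict.modify, pv_graph_getD L g k d0 hk, pv_graph_insert L g k _ hk]
  congr 1
  apply List.map_congr_left
  intro q _
  by_cases h : q = k <;> simp [h]

theorem pv_s_loop (S L : List Int) (g : Int → Int) (δ : Int)
    (hS : ∀ x ∈ S, x ∈ L) :
    S.foldl (fun d q => d.modify q 0 (fun v => v + δ)) (PySem.Dict.mk (L.map fun q => (q, g q)))
      = PySem.Dict.mk (L.map fun q => (q, g q + δ * S.count q)) := by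
  induction S generalizing g with
  | nil => simp
  | cons a S ih =>
    simp only [List.foldl_cons]
    rw [pv_graph_modify L g a 0 _ (hS a (List.mem_cons_self))]
    rw [ih (fun q => if q = a then g q + δ else g q) (fun x hx => hS x (List.mem_cons_of_mem a hx))]
    congr 1
    apply List.map_congr_left
    intro q _
    have hc : ((a :: S).count q : Nat) = S.count q + if a = q then 1 else 0 := by
      rw [List.count_cons]; simp only [beq_iff_eq]
    rw [hc]
    push_cast
    by_cases h : q = a
    · subst h; simp; ring
    · rw [if_neg h, if_neg (fun e => h e.symm)]; simp

theorem pv_count_pyRange (a b q : Int) :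
    ((PySem.List.pyRange a b 1).count q : Int) = if a ≤ q ∧ q < b then 1 else 0 := by
  by_cases h : a ≤ q ∧ q < b
  · rw [if_pos h]
    exact_mod_cast List.count_eq_one_of_mem (PySem.List.nodup_pyRange_one a b)
      ((PySem.List.mem_pyRange_one).2 h)
  · rw [if_neg h]
    exact_mod_cast List.count_eq_zero_of_not_mem (fun hm => h ((PySem.List.mem_pyRange_one).1 hm))

theorem pv_t_loop (T : List Int) (r c δ : Int) (L : List Int) (g : Int → Int) (y0 : Int)
    (hT : ∀ t ∈ T, ∀ x : Int, r ≤ x → x ≤ t → x ∈ L) :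
    T.foldl (fun (p : Int × PySem.Dict Int Int) t =>
        (p.1 + c, (PySem.List.pyRange r (t + 1) 1).foldl (fun d q => d.modify q 0 (fun v => v + δ)) p.2))
      (y0, PySem.Dict.mk (L.map fun q => (q, g q)))
    = (y0 + c * T.length,
       PySem.Dict.mk (L.map fun q =>
         (q, g q + δ * (T.countP (fun t => decide (r ≤ q ∧ q ≤ t)) : Int)))) := by
  induction T generalizing y0 g with
  | nil => simp
  | cons t T ih =>
    simp only [List.foldl_cons]
    rw [pv_s_loop (PySem.List.pyRange r (t + 1) 1) L g δ
      (fun x hx => by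
        rcases (PySem.List.mem_pyRange_one).1 hx with ⟨h1, h2⟩
        exact hT t (List.mem_cons_self) x h1 (by omega))]
    rw [ih (fun q => g q + δ * ((PySem.List.pyRange r (t + 1) 1).count q : Int)) (y0 + c)
      (fun t' ht' => hT t' (List.mem_cons_of_mem t ht'))]
    simp only [Prod.mk.injEq]
    refine ⟨by push_cast [List.length_cons]; ring_nf, ?_⟩
    · congr 1
      apply List.map_congr_left
      intro q _
      have := pv_count_pyRange r (t + 1) q
      simp only [List.countP_cons]
      by_cases h : r ≤ q ∧ q ≤ t
      · rw [this, if_pos ⟨h.1, by omega⟩]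
        have hd : decide (r ≤ q ∧ q ≤ t) = true := by simp [h.1, h.2]
        simp only [hd, if_true, Prod.mk.injEq, true_and]
        push_cast
        ring
      · rw [this, if_neg (by omega)]
        have hd : decide (r ≤ q ∧ q ≤ t) = false := by simp; omega
        simp [hd]

theorem pv_countP_range (a q : Int) (n : Nat) :
    ((((List.range n).map (fun k : Nat => a + (k : Int))).countP (fun t => decide (q ≤ t))) : Int)
      = max ((n : Int) - max (q - a) 0) 0 := by
  induction n with
  | zero => simp
  | succ n ih =>
    rw [List.range_succ, List.map_append, List.countP_append]
    push_cast
    rw [ih]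
    by_cases h : q ≤ a + (n : Int)
    · have hd : decide (q ≤ a + (n : Int)) = true := by simpa using h
      simp only [List.map_cons, List.map_nil, List.countP_cons, List.countP_nil, hd]
      push_cast; omega
    · have hd : decide (q ≤ a + (n : Int)) = false := by simpa using h
      simp only [List.map_cons, List.map_nil, List.countP_cons, List.countP_nil, hd]
      push_cast; omega

theorem pv_countP_ge_pyRange (a b q : Int) :
    ((PySem.List.pyRange a b 1).countP (fun t => decide (q ≤ t)) : Int) = max (b - max a q) 0 := by
  rw [PySem.List.pyRange_one]
  rw [pv_countP_range a q (b - a).toNat]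
  omega

theorem pv_n_loop (N : List Int) (F : Int → Int × PySem.Dict Int Int) (L : List Int)
    (g : Int → List (Int × Int)) (ys : List Int)
    (hN : ∀ n ∈ N, n ∈ L) :
    N.foldl (fun (acc : List Int × PySem.Dict Int (List (Int × Int))) n =>
        (acc.1 ++ [(F n).1], acc.2.insert n (F n).2.items))
      (ys, PySem.Dict.mk (L.map fun q => (q, g q)))
    = (ys ++ N.map (fun n => (F n).1),
       PySem.Dict.mk (L.map fun q => (q, if q ∈ N then (F q).2.items else g q))) := by
  induction N generalizing ys g with
  | nil => simp
  | cons n N ih =>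
    simp only [List.foldl_cons]
    rw [pv_graph_insert L g n _ (hN n (List.mem_cons_self))]
    rw [ih (fun q => if q = n then (F n).2.items else g q) (ys ++ [(F n).1])
      (fun m hm => hN m (List.mem_cons_of_mem n hm))]
    simp only [Prod.mk.injEq]
    refine ⟨by simp, ?_⟩
    congr 1
    apply List.map_congr_left
    intro q _
    by_cases h1 : q ∈ N
    · simp [h1, List.mem_cons]
    · by_cases h2 : q = n <;> simp [h1, h2, List.mem_cons]

theorem pv_dq0_eq (w r : Int) :
    (PySem.List.pyRange r (r + w) 1).foldl (fun d q => d.insert q 0) PySem.Dict.empty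
      = PySem.Dict.mk ((PySem.List.pyRange r (r + w) 1).map (fun q => (q, (0 : Int)))) := by
  apply PySem.Dict.ext
  rw [PySem.Dict.items_foldl_insert_fresh (PySem.List.pyRange r (r + w) 1) (fun a => a)
    (fun _ => 0) PySem.Dict.empty (fun a _ => PySem.Dict.contains_empty a)
    (by simpa using PySem.List.nodup_pyRange_one r (r+w))]
  simp [PySem.Dict.empty]

theorem pv_body_eq (w r h_ s n : Int) (hn0 : 0 ≤ n) (hnw : n ≤ w) :
    pvA_body w r h_ s n
      = (n * h_ - (w - n) * s,
         PySem.Dict.mk ((PySem.List.pyRange 0 w 1).map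
           (fun j => (r + j, s * (w - max j n) - h_ * max (n - j) 0)))) := by
  simp only [pvA_body, pv_dq0_eq, sub_eq_add_neg]
  rw [pv_t_loop (PySem.List.pyRange r (r + n) 1) r h_ (-h_) (PySem.List.pyRange r (r + w) 1)
      (fun _ => 0) 0
      (fun t ht x hx1 hx2 => by
        rcases (PySem.List.mem_pyRange_one).1 ht with ⟨h1, h2⟩
        exact (PySem.List.mem_pyRange_one).2 ⟨hx1, by omega⟩)]
  rw [pv_t_loop (PySem.List.pyRange (r + n) (r + w) 1) r (-s) s (PySem.List.pyRange r (r + w) 1)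
      _ _
      (fun t ht x hx1 hx2 => by
        rcases (PySem.List.mem_pyRange_one).1 ht with ⟨h1, h2⟩
        exact (PySem.List.mem_pyRange_one).2 ⟨hx1, by omega⟩)]
  simp only [PySem.List.length_pyRange_one, Prod.mk.injEq]
  constructor
  · have e1 : ((r + n - r).toNat : Int) = n := by omega
    have e2 : ((r + w - (r + n)).toNat : Int) = w - n := by omega
    rw [e1, e2]; ring
  · have hL : PySem.List.pyRange r (r + w) 1
        = (List.range w.toNat).map (fun k : Nat => r + (k : Int)) := by
      have e : r + w - r = w := by ring
      rw [PySem.List.pyRange_one, e]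
    have hR : PySem.List.pyRange 0 w 1
        = (List.range w.toNat).map (fun k : Nat => ((k : Int))) := by
      rw [PySem.List.pyRange_one]
      norm_num
    rw [hL, hR]
    congr 1
    simp only [List.map_map]
    apply List.map_congr_left
    intro k hk
    have hkw : (k : Int) < w := by
      have := List.mem_range.1 hk; omega
    have hk0 : (0 : Int) ≤ (k : Int) := Int.natCast_nonneg k
    simp only [Function.comp_apply, Prod.mk.injEq, true_and]
    have hc1 : (PySem.List.pyRange r (r + n) 1).countP (fun t => decide (r ≤ r + (k:Int) ∧ r + (k:Int) ≤ t))
        = (PySem.List.pyRange r (r + n) 1).countP (fun t => decide (r + (k:Int) ≤ t)) := by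
      apply List.countP_congr
      intro t _
      simp only [decide_eq_true_eq]
      constructor
      · exact fun h => h.2
      · exact fun h => ⟨by omega, h⟩
    have hc2 : (PySem.List.pyRange (r+n) (r + w) 1).countP (fun t => decide (r ≤ r + (k:Int) ∧ r + (k:Int) ≤ t))
        = (PySem.List.pyRange (r+n) (r + w) 1).countP (fun t => decide (r + (k:Int) ≤ t)) := by
      apply List.countP_congr
      intro t _
      simp only [decide_eq_true_eq]
      constructor
      · exact fun h => h.2
      · exact fun h => ⟨by omega, h⟩
    rw [hc1, hc2]
    have e1 := pv_countP_ge_pyRange r (r + n) (r + (k:Int))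
    have e2 := pv_countP_ge_pyRange (r + n) (r + w) (r + (k:Int))
    rw [e1, e2]
    have m1 : max (r + n - max r (r + (k:Int))) 0 = max (n - (k:Int)) 0 := by omega
    have m2 : max (r + w - max (r + n) (r + (k:Int))) 0 = w - max ((k:Int)) n := by omega
    rw [m1, m2]
    ring_nf

theorem pv_dn0_eq (w : Int) :
    (PySem.List.pyRange 0 (w + 1) 1).foldl (fun d n => d.insert n []) PySem.Dict.empty
      = PySem.Dict.mk ((PySem.List.pyRange 0 (w + 1) 1).map (fun q => (q, ([] : List (Int × Int))))) := by
  apply PySem.Dict.ext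
  rw [PySem.Dict.items_foldl_insert_fresh (PySem.List.pyRange 0 (w + 1) 1) (fun a => a)
    (fun _ => []) PySem.Dict.empty (fun a _ => PySem.Dict.contains_empty a)
    (by simpa using PySem.List.nodup_pyRange_one 0 (w+1))]
  simp [PySem.Dict.empty]

theorem pv_alt_row (w r h_ s n : Int) (hn0 : 0 ≤ n) (hnw : n ≤ w) :
    ((PySem.List.pyRange 0 w 1).map (fun j => r + j)).zip
        ((PySem.List.pyRange 0 n 1).map (fun j => s * (w - n) - h_ * (n - j))
          ++ (PySem.List.pyRange n w 1).map (fun j => s * (w - j)))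
      = (PySem.List.pyRange 0 w 1).map
          (fun j => (r + j, s * (w - max j n) - h_ * max (n - j) 0)) := by
  rw [PySem.List.pyRange_one_append 0 n w hn0 hnw]
  rw [List.map_append, List.map_append]
  rw [List.zip_append (by simp [PySem.List.length_pyRange_one])]
  rw [List.zip_map', List.zip_map']
  congr 1
  · apply List.map_congr_left
    intro j hj
    rcases (PySem.List.mem_pyRange_one).1 hj with ⟨h0, h1⟩
    have e1 : max j n = n := by omega
    have e2 : max (n - j) 0 = n - j := by omega
    rw [e1, e2]
  · apply List.map_congr_left
    intro j hj
    rcases (PySem.List.mem_pyRange_one).1 hj with ⟨h0, h1⟩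
    have e1 : max j n = j := by omega
    have e2 : max (n - j) 0 = 0 := by omega
    rw [e1, e2]
    ring_nf

theorem pv_main (w r h_ s : Int) :
    calculate_C_h_s_coefficients w r h_ s = calculate_C_h_s_coefficients_alt w r h_ s := by
  simp only [calculate_C_h_s_coefficients, pv_dn0_eq]
  rw [pv_n_loop (PySem.List.pyRange 0 (w + 1) 1) (pvA_body w r h_ s)
    (PySem.List.pyRange 0 (w + 1) 1) (fun _ => []) [] (fun n hn => hn)]
  simp only [calculate_C_h_s_coefficients_alt, List.nil_append, Prod.mk.injEq]
  constructor
  · apply List.map_congr_left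
    intro n hn
    rcases (PySem.List.mem_pyRange_one).1 hn with ⟨h0, h1⟩
    rw [pv_body_eq w r h_ s n h0 (by omega)]
  · apply List.map_congr_left
    intro n hn
    rcases (PySem.List.mem_pyRange_one).1 hn with ⟨h0, h1⟩
    rw [if_pos hn, pv_body_eq w r h_ s n h0 (by omega), pv_alt_row w r h_ s n h0 (by omega)]

-- ===== VERDICT (by name: the statement is the Claim_ definition above) =====
theorem calculate_C_h_s_coefficients_spec : Claim_equal_calculate_C_h_s_coefficients := by
  intro w r h_ s _
  exact pv_main w r h_ s
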